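-- pv_equiv track=rewrite | github.com/lsst/utils | python/lsst/utils/iteration.py | _extract_numeric_suffix
-- ===== SOURCE A (Python) =====
-- def _extract_numeric_suffix(s: str) -> tuple[str, int | None]:
--     """Extract the numeric suffix from a string.
--
--     Returns the prefix and the numeric suffix as an integer, if present.
--
--     For example:
--     'node1' -> ('node', 1)
--     'node' -> ('node', None)
--     'node123abc' -> ('node123abc', None)
--
--     Parameters
--     ----------
--     s : str
--         The string to extract the numeric suffix from.
--
--     Returns
--     -------
--     suffix : str
--         The numeric suffix of the string, if any.
--     """
--     index = len(s)
--     while index > 0 and s[index - 1].isdigit():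
--         index -= 1
--     prefix = s[:index]
--     suffix = s[index:]
--     if suffix:
--         return prefix, int(suffix)
--     else:
--         return s, None
-- ===== SOURCE B (Python) =====
-- def _extract_numeric_suffix(s: str) -> tuple[str, int | None]:
--     last = -1
--     for i, ch in enumerate(s):
--         if not ch.isdigit():
--             last = i
--     prefix = s[: last + 1]
--     suffix = s[last + 1 :]
--     if suffix:
--         return prefix, int(suffix)
--     return s, None
-- ===== Notes on version B (the rewrite author's own statement) =====
-- stated objective: alternative
-- what changed: Replaces A's backward early-stopping while loop over indices with a single forward enumerate pass that records the index of the last non-digit character and splits there.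
import Mathlib
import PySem

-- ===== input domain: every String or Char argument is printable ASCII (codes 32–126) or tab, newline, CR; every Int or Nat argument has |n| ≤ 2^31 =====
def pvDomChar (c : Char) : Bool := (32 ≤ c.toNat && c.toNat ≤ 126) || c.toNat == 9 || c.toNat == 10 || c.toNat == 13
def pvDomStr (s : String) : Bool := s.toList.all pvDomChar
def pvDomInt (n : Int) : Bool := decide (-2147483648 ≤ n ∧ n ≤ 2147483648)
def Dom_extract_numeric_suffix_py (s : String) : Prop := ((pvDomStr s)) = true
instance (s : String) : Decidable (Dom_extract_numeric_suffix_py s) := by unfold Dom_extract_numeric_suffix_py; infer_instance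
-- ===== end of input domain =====

-- B replaces A's backward early-stopping index loop with a single forward pass
-- recording the last non-digit position (alternative decomposition, same cost).


-- ===== PORT A =====
-- `while index > 0 and s[index-1].isdigit(): index -= 1`, structural recursion on index
def pvALoop (cs : List Char) : Nat → Nat
  | 0 => 0
  | Nat.succ i => if PySem.Chars.isdigit (cs.getD i ' ') then pvALoop cs i else i + 1

def extract_numeric_suffix_py (s : String) : String × Option Int :=
  let cs := s.toList
  let index := pvALoop cs cs.length
  let pre := cs.take index          -- s[:index], index in [0, len]
  let suf := cs.drop index          -- s[index:]
  if suf ≠ [] then (String.ofList pre, PySem.Int.ofChars? suf) else (s, none)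

-- ===== PORT B =====
-- forward pass: last = index of the most recent non-digit character, initially -1
def pvBLast (cs : List Char) : Int :=
  (PySem.List.enumerate cs).foldl
    (fun last p => if !PySem.Chars.isdigit p.2 then p.1 else last) (-1)

def extract_numeric_suffix_py_alt (s : String) : String × Option Int :=
  let cs := s.toList
  let k := (pvBLast cs + 1).toNat
  let pre := cs.take k              -- s[: last+1]
  let suf := cs.drop k              -- s[last+1 :]
  if suf ≠ [] then (String.ofList pre, PySem.Int.ofChars? suf) else (s, none)

-- ===== PRECONDITION & SPEC =====
def Spec_extract_numeric_suffix_py (s : String) (out : String × Option Int) : Prop := out = extract_numeric_suffix_py_alt s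
instance (s : String) (out : String × Option Int) : Decidable (Spec_extract_numeric_suffix_py s out) := by unfold Spec_extract_numeric_suffix_py; infer_instance

-- ===== CLAIM (what is proved, stated in full; the proofs are below) =====
def Claim_equal_extract_numeric_suffix_py : Prop := ∀ (s : String), Dom_extract_numeric_suffix_py s → Spec_extract_numeric_suffix_py s (extract_numeric_suffix_py s)

-- ===== LEMMAS AND PROOFS =====
-- A's loop never reads positions ≥ i, so appending a character leaves it unchanged
theorem pvALoop_append (cs : List Char) (c : Char) :
    ∀ i, i ≤ cs.length → pvALoop (cs ++ [c]) i = pvALoop cs i := by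
  intro i
  induction i with
  | zero => intro _; rfl
  | succ j ih =>
    intro h
    have hj : j < cs.length := h
    simp [pvALoop, List.getD, List.getElem?_append_left hj, ih (Nat.le_of_lt hj)]

-- B's fold over an extra trailing character
theorem pvBLast_append (cs : List Char) (c : Char) :
    pvBLast (cs ++ [c]) =
      if !PySem.Chars.isdigit c then (cs.length : Int) else pvBLast cs := by
  have h : ∀ (s : Int) (acc : Int),
      (PySem.List.enumerate (cs ++ [c]) s).foldl
        (fun last p => if !PySem.Chars.isdigit p.2 then p.1 else last) acc =
      if !PySem.Chars.isdigit c then (s + cs.length : Int) else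
        (PySem.List.enumerate cs s).foldl
          (fun last p => if !PySem.Chars.isdigit p.2 then p.1 else last) acc := by
    induction cs with
    | nil =>
      intro s acc
      simp [PySem.List.enumerate_cons, PySem.List.enumerate_nil, List.foldl]
    | cons x xs ih =>
      intro s acc
      simp only [List.cons_append, PySem.List.enumerate_cons, List.foldl_cons, ih]
      split <;> simp <;> ring
  unfold pvBLast
  rw [h]
  simp

-- the split index agrees: A's final index = B's last+1
theorem pv_index_eq (cs : List Char) :
    pvALoop cs cs.length = (pvBLast cs + 1).toNat := by
  induction cs using List.reverseRecOn with
  | nil => simp [pvALoop, pvBLast, PySem.List.enumerate_nil]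
  | append_singleton xs c ih =>
    rw [pvBLast_append]
    have hlen : (xs ++ [c]).length = xs.length + 1 := by simp
    rw [hlen]
    have hg : (xs ++ [c]).getD xs.length ' ' = c := by
      simp [List.getD]
    by_cases hd : PySem.Chars.isdigit c
    · rw [if_neg (by simp [hd])]
      simp only [pvALoop, hg, hd, if_true]
      rw [pvALoop_append xs c xs.length le_rfl, ih]
    · rw [if_pos (by simp [hd])]
      simp [pvALoop, hd]

-- ===== VERDICT (by name: the statement is the Claim_ definition above) =====
theorem extract_numeric_suffix_py_spec : Claim_equal_extract_numeric_suffix_py := by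
  intro s _
  show extract_numeric_suffix_py s = extract_numeric_suffix_py_alt s
  simp only [extract_numeric_suffix_py, extract_numeric_suffix_py_alt, pv_index_eq]
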